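-- pv_equiv track=rewrite | github.com/kylenguyen-cs30/lexer | src/main.py | handle_line_comments
-- ===== SOURCE A (Python) =====
-- def handle_line_comments(text):
--     lines = []
--     for line in text.split("\n"):
--         if "//" in line:
--             comment_pos = line.find("//")
--             comment_text = line[comment_pos:]
--             line = line[:comment_pos] + "{" + comment_text[2:] + "}"
--         lines.append(line)
--     return "\n".join(lines)
-- ===== SOURCE B (Python) =====
-- def handle_line_comments(text):
--     # Single left-to-right scan with an "inside a comment" flag: emit "{" at the
--     # first "//" of a line, copy until the newline, emit "}" there.
--     out = []
--     in_comment = False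
--     i = 0
--     n = len(text)
--     while i < n:
--         c = text[i]
--         if c == "\n":
--             if in_comment:
--                 out.append("}")
--                 in_comment = False
--             out.append("\n")
--             i += 1
--         elif not in_comment and c == "/" and i + 1 < n and text[i + 1] == "/":
--             out.append("{")
--             in_comment = True
--             i += 2
--         else:
--             out.append(c)
--             i += 1
--     if in_comment:
--         out.append("}")
--     return "".join(out)
-- ===== Notes on version B (the rewrite author's own statement) =====
-- stated objective: alternative
-- what changed: Replaced split('\n')/find('//')/slice/join per-line processing by a single character-level scan with an in-comment flag that emits '{' at the first '//' of each line and '}' at the line end.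
import Mathlib
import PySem

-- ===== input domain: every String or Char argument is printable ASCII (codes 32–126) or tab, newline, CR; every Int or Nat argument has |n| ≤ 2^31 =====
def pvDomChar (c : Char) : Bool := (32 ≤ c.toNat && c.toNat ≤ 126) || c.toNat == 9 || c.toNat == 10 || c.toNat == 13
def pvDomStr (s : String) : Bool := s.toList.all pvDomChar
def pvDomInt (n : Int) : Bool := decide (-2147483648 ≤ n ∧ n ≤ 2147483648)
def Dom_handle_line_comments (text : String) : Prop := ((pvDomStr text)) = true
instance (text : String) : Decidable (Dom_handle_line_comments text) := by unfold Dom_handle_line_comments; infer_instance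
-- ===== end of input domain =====

-- B replaces A's per-line split/find/slice/join processing by one character-level scan with an in-comment flag; same output on every input.

-- ===== PORT A =====
-- per-line body of A's loop: if "//" in line: pos = line.find("//"); line = line[:pos] + "{" + line[pos:][2:] + "}"
def pvLineA (line : List Char) : List Char :=
  if PySem.Chars.isIn ['/', '/'] line then
    let pos := PySem.Chars.find line ['/', '/']
    let commentText := PySem.List.slice line (some pos) none
    PySem.List.slice line none (some pos) ++ ['{'] ++ PySem.List.slice commentText (some 2) none ++ ['}']
  else line

def handle_line_comments (text : String) : String :=
  let lines := (PySem.Chars.splitOn text.toList ['\n']).foldl (fun acc line => acc ++ [pvLineA line]) []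
  String.mk (PySem.Chars.join ['\n'] lines)

-- ===== PORT B =====
-- Source B's scan: the Bool is the in_comment flag; '\n' closes a comment, "//" outside one opens it.
def pvScanB (b : Bool) (l : List Char) : List Char :=
  match l with
  | [] => if b then ['}'] else []
  | c :: cs =>
    if c = '\n' then (if b then ['}', '\n'] else ['\n']) ++ pvScanB false cs
    else if b = false ∧ c = '/' ∧ cs.head? = some '/' then '{' :: pvScanB true cs.tail
    else c :: pvScanB b cs
termination_by l.length
decreasing_by all_goals simp [List.length_tail]

def handle_line_comments_alt (text : String) : String :=
  String.mk (pvScanB false text.toList)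

-- ===== PRECONDITION & SPEC =====
def Spec_handle_line_comments (text : String) (out : String) : Prop := out = handle_line_comments_alt text
instance (text : String) (out : String) : Decidable (Spec_handle_line_comments text out) := by unfold Spec_handle_line_comments; infer_instance

-- ===== CLAIM (what is proved, stated in full; the proofs are below) =====
def Claim_equal_handle_line_comments : Prop := ∀ (text : String), Dom_handle_line_comments text → Spec_handle_line_comments text (handle_line_comments text)

-- ===== LEMMAS AND PROOFS =====

-- proof-side recursive description of A's per-line transform
def lineF : List Char → List Char
  | [] => []
  | c :: cs => if c = '/' ∧ cs.head? = some '/' then '{' :: cs.tail ++ ['}'] else c :: lineF cs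

-- proof-side recursive description of split("\n"); pre is the part of the current line already read
def mySplit (pre : List Char) : List Char → List (List Char)
  | [] => [pre]
  | c :: cs => if c = '\n' then pre :: mySplit [] cs else mySplit (pre ++ [c]) cs

theorem mySplit_ne_nil (pre cs) : mySplit pre cs ≠ [] := by
  induction cs generalizing pre with
  | nil => simp [mySplit]
  | cons c cs ih => by_cases h : c = '\n' <;> simp [mySplit, h, ih]

theorem mySplit_no_nl (pre cs) (h : '\n' ∉ cs) : mySplit pre cs = [pre ++ cs] := by
  induction cs generalizing pre with
  | nil => simp [mySplit]
  | cons c cs ih =>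
    simp only [List.mem_cons, not_or] at h
    simp [mySplit, Ne.symm h.1, ih _ h.2]

theorem mySplit_append (pre l rest) (h : '\n' ∉ l) :
    mySplit pre (l ++ '\n' :: rest) = (pre ++ l) :: mySplit [] rest := by
  induction l generalizing pre with
  | nil => simp [mySplit]
  | cons c cs ih =>
    simp only [List.mem_cons, not_or] at h
    simp [mySplit, Ne.symm h.1, ih _ h.2]

theorem splitOn_go_spec (fuel l cur acc) (h : l.length < fuel) :
    PySem.Chars.splitOn.go ['\n'] fuel l cur acc = acc.reverse ++ mySplit cur.reverse l := by
  induction fuel generalizing l cur acc with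
  | zero => omega
  | succ fuel ih =>
    cases l with
    | nil => simp [PySem.Chars.splitOn.go, mySplit]
    | cons c rest =>
      by_cases hc : c = '\n'
      · subst hc
        simp only [PySem.Chars.splitOn.go, List.isPrefixOf_cons₂_self, List.isPrefixOf_nil_left,
          if_pos]
        rw [ih _ _ _ (by simpa using Nat.lt_of_succ_lt_succ h)]
        simp [mySplit]
      · have hpre : List.isPrefixOf ['\n'] (c :: rest) = false := by
          simp [List.isPrefixOf, Ne.symm hc]
        simp only [PySem.Chars.splitOn.go, hpre, Bool.false_eq_true, if_neg, not_false_iff]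
        rw [ih _ _ _ (by simpa using Nat.lt_of_succ_lt_succ h)]
        simp [mySplit, hc]

theorem splitOn_eq (cs : List Char) : PySem.Chars.splitOn cs ['\n'] = mySplit [] cs := by
  unfold PySem.Chars.splitOn
  rw [splitOn_go_spec _ _ _ _ (by omega)]
  simp

-- find.go with sub = "//": shifting the running index
theorem findgo_shift (t : List Char) (k : Nat) :
    PySem.Chars.find.go ['/', '/'] t k =
      if PySem.Chars.find.go ['/', '/'] t 0 = -1 then -1
      else PySem.Chars.find.go ['/', '/'] t 0 + k := by
  induction t generalizing k with
  | nil => simp [PySem.Chars.find.go]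
  | cons c t ih =>
    by_cases hp : List.isPrefixOf ['/', '/'] (c :: t) = true
    · simp [PySem.Chars.find.go, hp]
    · simp only [PySem.Chars.find.go, hp, Bool.false_eq_true, if_neg, not_false_iff]
      rw [ih (k + 1), ih 1]
      have hrfl : PySem.Chars.find t ['/', '/'] = PySem.Chars.find.go ['/', '/'] t 0 := rfl
      have hx : 0 ≤ PySem.Chars.find.go ['/', '/'] t 0 ∨
          PySem.Chars.find.go ['/', '/'] t 0 = -1 := by
        by_cases hI : ['/', '/'] <:+: t
        · exact Or.inl (hrfl ▸ (PySem.Chars.find_nonneg_iff t _).mpr hI)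
        · exact Or.inr (hrfl ▸ (PySem.Chars.find_eq_neg_one_iff t _).mpr hI)
      split_ifs with h1 <;> push_cast <;> omega

theorem pvLineA_eq_lineF (l : List Char) : pvLineA l = lineF l := by
  induction l with
  | nil => simp [pvLineA, lineF, PySem.Chars.isIn, PySem.Chars.find, PySem.Chars.find.go]
  | cons c cs ih =>
    by_cases hp : c = '/' ∧ cs.head? = some '/'
    · obtain ⟨hc, hh⟩ := hp
      cases cs with
      | nil => simp at hh
      | cons c2 m =>
        simp only [List.head?_cons, Option.some.injEq] at hh
        subst hc; subst hh
        have hfind : PySem.Chars.find ('/' :: '/' :: m) ['/', '/'] = 0 := by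
          simp [PySem.Chars.find, PySem.Chars.find.go, List.isPrefixOf]
        have hin : PySem.Chars.isIn ['/', '/'] ('/' :: '/' :: m) = true := by
          simp [PySem.Chars.isIn, hfind]
        simp [pvLineA, hin, hfind, lineF, PySem.List.slice_to, PySem.List.slice_from]
    · have hpre : List.isPrefixOf ['/', '/'] (c :: cs) = false := by
        cases cs with
        | nil => simp [List.isPrefixOf]
        | cons c2 m =>
          simp [List.isPrefixOf]
          intro h1 h2
          exact hp ⟨h1.symm, by simp [← h2]⟩
      have hstep : PySem.Chars.find (c :: cs) ['/', '/'] =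
          if PySem.Chars.find cs ['/', '/'] = -1 then -1
          else PySem.Chars.find cs ['/', '/'] + 1 := by
        simp only [PySem.Chars.find, PySem.Chars.find.go, hpre, Bool.false_eq_true, if_neg,
          not_false_iff]
        exact findgo_shift cs 1
      have hlineF : lineF (c :: cs) = c :: lineF cs := by
        simp [lineF, hp]
      by_cases hin : PySem.Chars.isIn ['/', '/'] cs = true
      · have hnn : 0 ≤ PySem.Chars.find cs ['/', '/'] :=
          (PySem.Chars.find_nonneg_iff _ _).mpr ((PySem.Chars.isIn_iff_infix _ _).mp hin)
        have hne : PySem.Chars.find cs ['/', '/'] ≠ -1 := by omega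
        have hfind : PySem.Chars.find (c :: cs) ['/', '/'] =
            PySem.Chars.find cs ['/', '/'] + 1 := by rw [hstep, if_neg hne]
        have hin' : PySem.Chars.isIn ['/', '/'] (c :: cs) = true := by
          simp [PySem.Chars.isIn, hfind]; omega
        rw [hlineF, ← ih]
        simp only [pvLineA, hin, hin', if_pos, hfind]
        rw [PySem.List.slice_to (c :: cs) (by omega), PySem.List.slice_to cs hnn,
          PySem.List.slice_from (c :: cs) (by omega), PySem.List.slice_from cs hnn,
          PySem.List.slice_from (List.drop (PySem.Chars.find cs ['/', '/'] + 1).toNat (c :: cs))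
            (by norm_num : (0:Int) ≤ 2),
          PySem.List.slice_from (List.drop (PySem.Chars.find cs ['/', '/']).toNat cs)
            (by norm_num : (0:Int) ≤ 2)]
        have h1 : (PySem.Chars.find cs ['/', '/'] + 1).toNat =
            (PySem.Chars.find cs ['/', '/']).toNat + 1 := by omega
        simp [h1]
      · have hne : PySem.Chars.find cs ['/', '/'] = -1 := by
          by_contra hne
          exact hin (by simp [PySem.Chars.isIn, hne])
        have hfind : PySem.Chars.find (c :: cs) ['/', '/'] = -1 := by
          rw [hstep, if_pos hne]
        have hin' : PySem.Chars.isIn ['/', '/'] (c :: cs) = false := by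
          simp [PySem.Chars.isIn, hfind]
        have hcs : pvLineA cs = cs := by simp [pvLineA, hin]
        rw [hlineF, ← ih, hcs]
        simp [pvLineA, hin']

-- B-side: the scan inside a comment copies the line and closes with '}'
theorem scanB_true_mid (m rest : List Char) (h : '\n' ∉ m) :
    pvScanB true (m ++ '\n' :: rest) = m ++ '}' :: '\n' :: pvScanB false rest := by
  induction m with
  | nil => simp [pvScanB]
  | cons c m ih =>
    simp only [List.mem_cons, not_or] at h
    rw [List.cons_append, pvScanB]
    simp [Ne.symm h.1, ih h.2]

theorem scanB_true_end (m : List Char) (h : '\n' ∉ m) : pvScanB true m = m ++ ['}'] := by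
  induction m with
  | nil => simp [pvScanB]
  | cons c m ih =>
    simp only [List.mem_cons, not_or] at h
    rw [pvScanB]
    simp [Ne.symm h.1, ih h.2]

-- B-side: the scan outside a comment processes one whole line like lineF
theorem scanB_false_line (l rest : List Char) (h : '\n' ∉ l) :
    pvScanB false (l ++ '\n' :: rest) = lineF l ++ '\n' :: pvScanB false rest := by
  induction l with
  | nil => simp [pvScanB, lineF]
  | cons c l ih =>
    simp only [List.mem_cons, not_or] at h
    by_cases hp : c = '/' ∧ l.head? = some '/'
    · obtain ⟨hc, hh⟩ := hp
      cases l with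
      | nil => simp at hh
      | cons c2 m =>
        simp only [List.head?_cons, Option.some.injEq] at hh
        subst hc; subst hh
        simp only [List.mem_cons, not_or] at h
        rw [List.cons_append, pvScanB]
        simp only [List.cons_append, List.head?_cons, List.tail_cons]
        rw [if_neg (by simp), if_pos (by simp)]
        rw [scanB_true_mid m rest h.2.2]
        simp [lineF]
    · have hlineF : lineF (c :: l) = c :: lineF l := by simp [lineF, hp]
      have hcond : ¬ (false = false ∧ c = '/' ∧ (l ++ '\n' :: rest).head? = some '/') := by
        rintro ⟨-, hc, hh⟩
        cases l with
        | nil => simp at hh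
        | cons c2 m => exact hp ⟨hc, by simpa using hh⟩
      rw [List.cons_append, pvScanB, if_neg (by simp [Ne.symm h.1]), if_neg hcond]
      rw [ih h.2, hlineF]
      simp

theorem scanB_false_end (l : List Char) (h : '\n' ∉ l) : pvScanB false l = lineF l := by
  induction l with
  | nil => simp [pvScanB, lineF]
  | cons c l ih =>
    simp only [List.mem_cons, not_or] at h
    by_cases hp : c = '/' ∧ l.head? = some '/'
    · obtain ⟨hc, hh⟩ := hp
      cases l with
      | nil => simp at hh
      | cons c2 m =>
        simp only [List.head?_cons, Option.some.injEq] at hh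
        subst hc; subst hh
        simp only [List.mem_cons, not_or] at h
        rw [pvScanB]
        simp only [List.head?_cons, List.tail_cons]
        rw [if_neg (by simp), if_pos (by simp)]
        rw [scanB_true_end m h.2.2]
        simp [lineF]
    · have hlineF : lineF (c :: l) = c :: lineF l := by simp [lineF, hp]
      have hcond : ¬ (false = false ∧ c = '/' ∧ l.head? = some '/') := by
        rintro ⟨-, hc, hh⟩; exact hp ⟨hc, hh⟩
      rw [pvScanB, if_neg (by simp [Ne.symm h.1]), if_neg hcond, ih h.2, hlineF]

theorem main_eq (cs : List Char) :
    PySem.Chars.join ['\n'] ((mySplit [] cs).map lineF) = pvScanB false cs := by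
  have H : ∀ n cs, List.length cs ≤ n →
      PySem.Chars.join ['\n'] ((mySplit ([] : List Char) cs).map lineF) = pvScanB false cs := by
    intro n
    induction n with
    | zero =>
      intro cs hcs
      rw [List.length_eq_zero_iff.mp (Nat.le_zero.mp hcs)]
      simp [mySplit, PySem.Chars.join_singleton, lineF, pvScanB]
    | succ n ih =>
      intro cs hcs
      by_cases hm : '\n' ∈ cs
      · obtain ⟨l, rest, rfl, hl⟩ := List.eq_append_cons_of_mem hm
        rw [mySplit_append [] l rest hl, scanB_false_line l rest hl]
        obtain ⟨p, ps, hps⟩ := List.exists_cons_of_ne_nil (mySplit_ne_nil [] rest)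
        have hrest : rest.length ≤ n := by
          have := hcs; simp [List.length_append] at this; omega
        rw [List.nil_append, hps, List.map_cons, List.map_cons,
          PySem.Chars.join_cons_cons, ← List.map_cons, ← hps, ih rest hrest]
        simp
      · rw [mySplit_no_nl [] cs hm, scanB_false_end cs hm]
        simp [PySem.Chars.join_singleton]
  exact H cs.length cs le_rfl

-- ===== VERDICT (by name: the statement is the Claim_ definition above) =====
theorem handle_line_comments_spec : Claim_equal_handle_line_comments := by
  intro text _
  unfold Spec_handle_line_comments handle_line_comments handle_line_comments_alt
  rw [PySem.List.foldl_append_singleton_eq_map, List.nil_append, splitOn_eq]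
  have : (mySplit [] text.toList).map pvLineA = (mySplit [] text.toList).map lineF :=
    List.map_congr_left (fun l _ => pvLineA_eq_lineF l)
  rw [this]
  show String.mk (PySem.Chars.join ['\n'] (List.map lineF (mySplit [] text.toList))) = _
  rw [main_eq]
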